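-- pv_equiv track=rewrite | github.com/MouinulIslamNJIT/IRV_Fairness | Utils.py | createEquivalenceClasses
-- ===== SOURCE A (Python) =====
-- def createEquivalenceClasses(B,pi):
--     pi = list(pi)
--     pi.reverse()
--     B_new = {}
--     for b in B.keys():
--         b_new = []
--         if len(b) == 0:
--             continue
--         c = b[0]
--         b_new.append(c)
--         i = pi.index(c)
--         for c in b:
--             j = pi.index(c)
--             if j < i:
--                 i = j
--                 b_new.append(c)
--         b_new = tuple(b_new)
--         if b_new in B_new:
--             B_new[b_new] = B_new[b_new] + B[b]
--         else:
--             B_new[b_new] = B[b]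
--
--     return B_new
-- ===== SOURCE B (Python) =====
-- def createEquivalenceClasses(B, pi):
--     pos = {c: k for k, c in enumerate(pi)}
--
--     def classKey(b):
--         # first candidate leads; everything it beats is discarded; recurse on the survivors
--         if not b:
--             return ()
--         c = b[0]
--         return (c,) + classKey([d for d in b[1:] if pos[d] > pos[c]])
--
--     B_new = {}
--     for b, w in B.items():
--         if b:
--             key = classKey(b)
--             B_new[key] = B_new.get(key, 0) + w
--     return B_new
-- ===== Notes on version B (the rewrite author's own statement) =====
-- stated objective: alternative
-- what changed: Replaces A's single running-minimum scan over reversed pi with a recursive decomposition: a position dict is built once from pi, then per ballot the head candidate is a leader, every later candidate it outranks is discarded by a list filter, and the key is the leader consed onto the recursive key of the surviving sublist.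
import Mathlib
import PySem

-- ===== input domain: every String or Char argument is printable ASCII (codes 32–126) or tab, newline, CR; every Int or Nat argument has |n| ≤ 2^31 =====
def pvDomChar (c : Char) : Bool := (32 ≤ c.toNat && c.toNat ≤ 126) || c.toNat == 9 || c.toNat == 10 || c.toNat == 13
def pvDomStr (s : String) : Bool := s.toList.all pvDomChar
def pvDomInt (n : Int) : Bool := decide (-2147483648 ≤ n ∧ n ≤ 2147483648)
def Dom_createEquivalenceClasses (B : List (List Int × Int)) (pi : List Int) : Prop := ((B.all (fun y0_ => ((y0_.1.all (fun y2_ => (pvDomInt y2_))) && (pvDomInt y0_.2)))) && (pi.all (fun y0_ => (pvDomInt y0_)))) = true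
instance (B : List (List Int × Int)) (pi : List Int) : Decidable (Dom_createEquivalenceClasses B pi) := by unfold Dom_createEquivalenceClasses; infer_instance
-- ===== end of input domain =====

-- B replaces A's running-minimum scan over reversed pi by a recursive leader/filter decomposition
-- (position dict built once from pi; per ballot the head leads, candidates it outranks are filtered out,
-- recurse on the survivors); return-value equivalence only.

-- ===== PORT A =====
-- inner loop of A: b_new = [b[0]]; i = pi.index(b[0]); for c in b: j = pi.index(c); if j < i: i = j; b_new.append(c)
def pvAKey (rev : List Int) (c0 : Int) (b : List Int) : List Int :=
  let i : Nat := (PySem.List.index? rev c0).getD 0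
  (b.foldl (fun (s : List Int × Nat) c =>
      let j : Nat := (PySem.List.index? rev c).getD 0
      if j < s.2 then (s.1 ++ [c], j) else s) ([c0], i)).1

def createEquivalenceClasses (B : List (List Int × Int)) (pi : List Int) : List (List Int × Int) :=
  let rev := pi.reverse
  (B.foldl (fun (Bn : PySem.Dict (List Int) Int) bw =>
      match bw.1 with
      | [] => Bn
      | c0 :: _ =>
        let key := pvAKey rev c0 bw.1
        if Bn.contains key then Bn.insert key (Bn.getD key 0 + bw.2)
        else Bn.insert key bw.2)
    PySem.Dict.empty).items

-- ===== PORT B =====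
-- pos = {c: k for k, c in enumerate(pi)}
def pvPosDict (pi : List Int) : PySem.Dict Int Int :=
  (PySem.List.enumerate pi).foldl (fun d kc => d.insert kc.2 kc.1) PySem.Dict.empty

-- classKey(b): if not b: (); c = b[0]; (c,) + classKey([d for d in b[1:] if pos[d] > pos[c]])
def pvClassKey (pos : PySem.Dict Int Int) : List Int → List Int
  | [] => []
  | c :: rest => c :: pvClassKey pos (rest.filter (fun d => pos.getD d 0 > pos.getD c 0))
termination_by l => l.length
decreasing_by
  simp only [List.length_unattach, List.length_cons]
  exact Nat.lt_succ_of_le ((List.length_filter_le _ _).trans (Nat.le_of_eq List.length_attach))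

def createEquivalenceClasses_alt (B : List (List Int × Int)) (pi : List Int) : List (List Int × Int) :=
  let pos := pvPosDict pi
  (B.foldl (fun (Bn : PySem.Dict (List Int) Int) bw =>
      if bw.1 = [] then Bn
      else
        let key := pvClassKey pos bw.1
        Bn.insert key (Bn.getD key 0 + bw.2))
    PySem.Dict.empty).items

-- ===== PRECONDITION & SPEC =====
-- Pre_ excludes (a) ballots containing a candidate absent from pi, where A raises ValueError in pi.index
-- (B raises KeyError there), and (b) association lists with duplicate ballot keys, which do not represent
-- any Python dict (A's parameter B is a dict).
def Pre_createEquivalenceClasses (B : List (List Int × Int)) (pi : List Int) : Prop :=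
  (B.map Prod.fst).Nodup ∧ ∀ p ∈ B, ∀ c ∈ p.1, c ∈ pi
instance (B : List (List Int × Int)) (pi : List Int) : Decidable (Pre_createEquivalenceClasses B pi) := by
  unfold Pre_createEquivalenceClasses; infer_instance

def pvWitness_createEquivalenceClasses : (List (List Int × Int)) × List Int :=
  ([([1, 2], 3), ([2, 1, 2], 4), ([], 1)], [2, 1, 3])

def Spec_createEquivalenceClasses (B : List (List Int × Int)) (pi : List Int) (out : List (List Int × Int)) : Prop := out = createEquivalenceClasses_alt B pi
instance (B : List (List Int × Int)) (pi : List Int) (out : List (List Int × Int)) : Decidable (Spec_createEquivalenceClasses B pi out) := by unfold Spec_createEquivalenceClasses; infer_instance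

-- ===== CLAIM (what is proved, stated in full; the proofs are below) =====
def Claim_equal_createEquivalenceClasses : Prop := ∀ (B : List (List Int × Int)) (pi : List Int), Dom_createEquivalenceClasses B pi → Pre_createEquivalenceClasses B pi → Spec_createEquivalenceClasses B pi (createEquivalenceClasses B pi)

-- ===== LEMMAS AND PROOFS =====

-- the candidates a ballot's tail keeps under A's scan with current running minimum i
def pvKeep (rev : List Int) : List Int → Nat → List Int
  | [], _ => []
  | c :: cs, i =>
    let j : Nat := (PySem.List.index? rev c).getD 0
    if j < i then c :: pvKeep rev cs j else pvKeep rev cs i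

theorem pvA_foldl (rev : List Int) (cs : List Int) (i : Nat) (acc : List Int) :
    (cs.foldl (fun (s : List Int × Nat) c =>
        let j : Nat := (PySem.List.index? rev c).getD 0
        if j < s.2 then (s.1 ++ [c], j) else s) (acc, i)).1 = acc ++ pvKeep rev cs i := by
  induction cs generalizing i acc with
  | nil => simp [pvKeep]
  | cons c cs ih =>
    simp only [List.foldl_cons, pvKeep]
    by_cases h : ((PySem.List.index? rev c).getD 0 : Nat) < i
    · rw [if_pos h, if_pos h, ih]; simp
    · rw [if_neg h, if_neg h, ih]

theorem pvAKey_eq_keep (rev : List Int) (c0 : Int) (cs : List Int) :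
    pvAKey rev c0 (c0 :: cs) = c0 :: pvKeep rev cs ((PySem.List.index? rev c0).getD 0) := by
  unfold pvAKey
  simp only [List.foldl_cons, lt_irrefl]
  simpa using pvA_foldl rev cs ((PySem.List.index? rev c0).getD 0) [c0]

-- B's recursion, expressed on A's ranks (index into reversed pi)
def pvSelR (r : Int → Nat) : List Int → List Int
  | [] => []
  | c :: rest => c :: pvSelR r (rest.filter (fun d => decide (r d < r c)))
termination_by l => l.length
decreasing_by
  simp only [List.length_unattach, List.length_cons]
  exact Nat.lt_succ_of_le ((List.length_filter_le _ _).trans (Nat.le_of_eq List.length_attach))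

-- the position dict holds, for each c ∈ pi, len(pi)-1-k where k is c's index in reversed pi
theorem pvPos_spec (pi : List Int) (c : Int) (hc : c ∈ pi) :
    ∃ k : Nat, PySem.List.index? pi.reverse c = some k ∧ k < pi.length ∧
      (pvPosDict pi).get? c = some ((pi.length : Int) - 1 - (k : Int)) := by
  induction pi using List.reverseRecOn with
  | nil => simp at hc
  | append_singleton xs x ih =>
    rw [show (xs ++ [x]).reverse = x :: xs.reverse from by simp]
    have hpd : pvPosDict (xs ++ [x]) = (pvPosDict xs).insert x (xs.length : Int) := by
      unfold pvPosDict
      rw [PySem.List.enumerate_append, List.foldl_append]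
      simp [PySem.List.enumerate_cons, PySem.List.enumerate_nil]
    by_cases hx : c = x
    · subst hx
      refine ⟨0, PySem.List.index?_cons_self _ _, by simp, ?_⟩
      rw [hpd, PySem.Dict.get?_insert_self]
      simp
    · have hcx : c ∈ xs := by
        rcases List.mem_append.mp hc with h | h
        · exact h
        · simp at h; exact absurd h hx
      obtain ⟨k, hk, hklt, hget⟩ := ih hcx
      refine ⟨k + 1, ?_, by simp; omega, ?_⟩
      · rw [PySem.List.index?_cons_of_ne _ (fun h => hx h.symm), hk]; rfl
      · rw [hpd, PySem.Dict.get?_insert_of_ne _ _ hx, hget]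
        simp; ring

-- pointwise bridge: comparing dict positions is comparing reversed-pi ranks, swapped
theorem pvBridge (pi : List Int) (c d : Int) (hc : c ∈ pi) (hd : d ∈ pi) :
    ((pvPosDict pi).getD d 0 > (pvPosDict pi).getD c 0)
      ↔ ((PySem.List.index? pi.reverse d).getD 0 < (PySem.List.index? pi.reverse c).getD 0) := by
  obtain ⟨kc, hkc, hkcl, hgc⟩ := pvPos_spec pi c hc
  obtain ⟨kd, hkd, hkdl, hgd⟩ := pvPos_spec pi d hd
  rw [PySem.Dict.getD_eq_get?_getD, PySem.Dict.getD_eq_get?_getD, hgc, hgd, hkc, hkd]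
  simp only [Option.getD_some]
  constructor <;> intro hh <;> omega

-- B's classKey equals the rank recursion on ballots drawn from pi
theorem pvClassKey_eq_selR (pi : List Int) :
    ∀ n (l : List Int), l.length ≤ n → (∀ c ∈ l, c ∈ pi) →
      pvClassKey (pvPosDict pi) l = pvSelR (fun x => (PySem.List.index? pi.reverse x).getD 0) l := by
  intro n
  induction n with
  | zero =>
    intro l hl _
    rw [List.length_eq_zero_iff.mp (Nat.le_zero.mp hl)]
    simp [pvClassKey, pvSelR]
  | succ n ih =>
    intro l hl hmem
    match l with
    | [] => simp [pvClassKey, pvSelR]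
    | c :: rest =>
      rw [pvClassKey, pvSelR]
      have hc : c ∈ pi := hmem c (by simp)
      have hfeq : rest.filter (fun d => (pvPosDict pi).getD d 0 > (pvPosDict pi).getD c 0)
          = rest.filter (fun d => decide ((PySem.List.index? pi.reverse d).getD 0 <
              (PySem.List.index? pi.reverse c).getD 0)) := by
        apply List.filter_congr
        intro d hdm
        rw [decide_eq_decide]
        exact pvBridge pi c d hc (hmem d (by simp [hdm]))
      rw [hfeq]
      congr 1
      apply ih
      · have := List.length_filter_le (fun d => decide ((PySem.List.index? pi.reverse d).getD 0 <
            (PySem.List.index? pi.reverse c).getD 0)) rest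
        simp at hl; omega
      · intro e he
        exact hmem e (by simp [List.mem_of_mem_filter he])

-- A's running-minimum scan equals the rank recursion applied to the pre-filtered tail
theorem pvKeep_eq_selR (rev : List Int) (cs : List Int) (i : Nat) :
    pvKeep rev cs i
      = pvSelR (fun x => (PySem.List.index? rev x).getD 0)
          (cs.filter (fun d => decide ((PySem.List.index? rev d).getD 0 < i))) := by
  induction cs generalizing i with
  | nil => simp [pvKeep, pvSelR]
  | cons c cs ih =>
    rw [pvKeep, List.filter_cons]
    by_cases h : ((PySem.List.index? rev c).getD 0 : Nat) < i
    · have hd : decide (((PySem.List.index? rev c).getD 0 : Nat) < i) = true := by simpa using h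
      rw [if_pos h, hd, if_pos rfl, pvSelR, List.filter_filter]
      congr 1
      rw [ih]
      congr 1
      apply List.filter_congr
      intro a _
      have h' : (List.idxOf? c rev).getD 0 < i := by simpa using h
      simp
      intro hh
      omega
    · have hd : decide (((PySem.List.index? rev c).getD 0 : Nat) < i) = false := by simpa using h
      rw [if_neg h, hd, if_neg Bool.false_ne_true]
      exact ih i

-- per-ballot agreement of the two key computations
theorem pvKey_eq (pi : List Int) (c0 : Int) (cs : List Int)
    (hmem : ∀ c ∈ c0 :: cs, c ∈ pi) :
    pvClassKey (pvPosDict pi) (c0 :: cs) = pvAKey pi.reverse c0 (c0 :: cs) := by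
  rw [pvAKey_eq_keep, pvClassKey_eq_selR pi (c0 :: cs).length _ le_rfl hmem, pvKeep_eq_selR,
    pvSelR]

-- A's contains-branch aggregation is B's unconditional get-add-insert
theorem pvDict_step (Bn : PySem.Dict (List Int) Int) (key : List Int) (w : Int) :
    (if Bn.contains key then Bn.insert key (Bn.getD key 0 + w) else Bn.insert key w)
      = Bn.insert key (Bn.getD key 0 + w) := by
  cases h : Bn.contains key with
  | true => rfl
  | false =>
    show Bn.insert key w = _
    rw [PySem.Dict.getD_of_not_contains _ _ h, zero_add]

-- ===== VERDICT (by name: the statement is the Claim_ definition above) =====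
theorem createEquivalenceClasses_spec : Claim_equal_createEquivalenceClasses := by
  intro B pi _ hpre
  unfold Spec_createEquivalenceClasses createEquivalenceClasses createEquivalenceClasses_alt
  show (List.foldl (fun (Bn : PySem.Dict (List Int) Int) bw =>
      match bw.1 with
      | [] => Bn
      | c0 :: _ =>
        let key := pvAKey pi.reverse c0 bw.1
        if Bn.contains key then Bn.insert key (Bn.getD key 0 + bw.2)
        else Bn.insert key bw.2) PySem.Dict.empty B).items
    = (List.foldl (fun (Bn : PySem.Dict (List Int) Int) bw =>
      if bw.1 = [] then Bn
      else
        let key := pvClassKey (pvPosDict pi) bw.1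
        Bn.insert key (Bn.getD key 0 + bw.2)) PySem.Dict.empty B).items
  congr 1
  apply PySem.List.foldl_congr_mem
  intro Bn bw hbw
  match bw with
  | ([], w) => rfl
  | (c0 :: cs, w) =>
    show (if Bn.contains (pvAKey pi.reverse c0 (c0 :: cs)) then _ else _) = _
    rw [if_neg (by simp : ¬ (c0 :: cs = [])) ]
    rw [← pvKey_eq pi c0 cs (fun c hc => hpre.2 _ hbw c hc)]
    exact pvDict_step Bn (pvClassKey (pvPosDict pi) (c0 :: cs)) w
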